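-- pv_equiv track=rewrite | github.com/ElzPad/LEARN_CompetitiveProgramming | adventOfCode_2025/day02/solution.py | generate_invalid_part2
-- ===== SOURCE A (Python) =====
-- def generate_invalid_part2(max_value: int) -> list[int]:
--     invalid = set()
--     max_len = len(str(max_value))
--
--     for n in range(2, max_len+1):
--         for base_len in range(1, n//2 + 1):
--             k = n//base_len
--             start = 10 ** (base_len-1)
--             end = 10 ** base_len
--
--             if n % base_len != 0 or k < 2:
--                 continue
--
--             for base in range(start, end):
--                 s = str(base) * k
--                 num = int(s)
--                 if num > max_value:
--                     break
--                 invalid.add(num)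
--
--     return sorted(invalid)
-- ===== SOURCE B (Python) =====
-- def generate_invalid_part2(max_value: int) -> list[int]:
--     # Recursive decomposition: a helper returns, for one (block length, repeat
--     # count) pair, the ascending list of repeated numbers that fit; a recursive
--     # collector unions those lists over all factor pairs (no divisibility filter).
--     max_len = len(str(max_value))
--
--     def nums_for(base_len, k):
--         out = []
--         base = 10 ** (base_len - 1)
--         while base < 10 ** base_len:
--             num = int(str(base) * k)
--             if num > max_value:
--                 break
--             out.append(num)
--             base += 1
--         return out
--
--     def collect(base_len):
--         if 2 * base_len > max_len:
--             return set()
--         found = collect(base_len + 1)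
--         for k in range(2, max_len // base_len + 1):
--             found.update(nums_for(base_len, k))
--         return found
--
--     return sorted(collect(1))
-- ===== Notes on version B (the rewrite author's own statement) =====
-- stated objective: alternative
-- what changed: B replaces A's triple nested loop over total digit lengths with its divisibility filter by a recursive collector over block lengths that unions, per (block length, repeat count) factor pair, an ascending list of fitting repetitions produced by a while-loop helper.
import Mathlib
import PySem

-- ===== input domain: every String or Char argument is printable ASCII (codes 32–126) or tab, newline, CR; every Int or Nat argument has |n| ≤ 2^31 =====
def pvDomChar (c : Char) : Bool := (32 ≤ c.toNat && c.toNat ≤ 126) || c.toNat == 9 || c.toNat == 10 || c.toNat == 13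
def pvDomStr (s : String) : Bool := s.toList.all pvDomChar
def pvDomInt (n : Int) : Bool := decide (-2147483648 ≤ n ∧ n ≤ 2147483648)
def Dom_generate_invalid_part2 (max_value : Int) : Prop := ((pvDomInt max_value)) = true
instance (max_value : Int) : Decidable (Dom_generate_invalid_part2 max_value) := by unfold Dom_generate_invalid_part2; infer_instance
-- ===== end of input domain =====

-- B replaces A's triple nested loop (total length, divisor filter, base range with break)
-- by a recursive collector over block lengths that unions per-(block length, repeat count)
-- lists built by a while-loop helper; objective: alternative decomposition, same cost.

-- ===== PORT A =====
-- inner 'for base in range(start, end): … break/add' loop of A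
def pvInnerA (max_value : Int) (k : Int) (inv : PySem.Set Int) : List Int → PySem.Set Int
  | [] => inv
  | base :: rest =>
      let num := (PySem.Int.ofChars? (PySem.List.pyRepeat (PySem.Int.toChars base) k)).getD 0
      -- int(str(base)*k) never raises here (digit string), so .getD 0 is exact
      if max_value < num then inv
      else pvInnerA max_value k (PySem.Set.add inv num) rest

def generate_invalid_part2 (max_value : Int) : List Int :=
  let invalid : PySem.Set Int := PySem.Set.empty
  let max_len : Int := PySem.Str.len (PySem.Int.toStr max_value)
  let invalid :=
    (PySem.List.pyRange 2 (max_len + 1)).foldl (fun invalid n =>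
      (PySem.List.pyRange 1 (PySem.Int.floordiv n 2 + 1)).foldl (fun invalid base_len =>
        let k := PySem.Int.floordiv n base_len
        -- 10 ** (base_len-1) / 10 ** base_len: exponents are ≥ 0 here, so .toNat is exact
        let start := (10:Int) ^ (base_len - 1).toNat
        let stop := (10:Int) ^ base_len.toNat
        if PySem.Int.mod n base_len ≠ 0 ∨ k < 2 then invalid
        else pvInnerA max_value k invalid (PySem.List.pyRange start stop)) invalid) invalid
  PySem.List.sorted invalid (fun x => x) false

-- ===== PORT B =====
-- 'while base < 10**base_len: … break/append; base += 1' loop of nums_for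
def pvNumsGo (max_value k : Int) (base stop : Int) : List Int :=
  if h : base < stop then
    let num := (PySem.Int.ofChars? (PySem.List.pyRepeat (PySem.Int.toChars base) k)).getD 0
    -- int(str(base)*k) never raises here (digit string), so .getD 0 is exact
    if max_value < num then []
    else num :: pvNumsGo max_value k (base + 1) stop
  else []
termination_by (stop - base).toNat
decreasing_by simp_wf; omega

-- nums_for(base_len, k): ascending list of fitting repetitions for one factor pair
def pvNumsFor (max_value base_len k : Int) : List Int :=
  -- exponents are ≥ 0 here, so .toNat is exact
  pvNumsGo max_value k ((10:Int) ^ (base_len - 1).toNat) ((10:Int) ^ base_len.toNat)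

-- collect(base_len): recursive union over block lengths ≥ base_len
def pvCollect (max_value max_len base_len : Int) : PySem.Set Int :=
  if h : max_len < 2 * base_len then PySem.Set.empty
  else
    (PySem.List.pyRange 2 (PySem.Int.floordiv max_len base_len + 1)).foldl
      (fun found k => PySem.Set.update found (pvNumsFor max_value base_len k))
      (pvCollect max_value max_len (base_len + 1))
termination_by (max_len + 2 - 2 * base_len).toNat
decreasing_by simp_wf; omega

def generate_invalid_part2_alt (max_value : Int) : List Int :=
  let max_len : Int := PySem.Str.len (PySem.Int.toStr max_value)
  PySem.List.sorted (pvCollect max_value max_len 1) (fun x => x) false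

-- ===== PRECONDITION & SPEC =====
def Spec_generate_invalid_part2 (max_value : Int) (out : List Int) : Prop := out = generate_invalid_part2_alt max_value
instance (max_value : Int) (out : List Int) : Decidable (Spec_generate_invalid_part2 max_value out) := by unfold Spec_generate_invalid_part2; infer_instance

-- ===== CLAIM (what is proved, stated in full; the proofs are below) =====
def Claim_equal_generate_invalid_part2 : Prop := ∀ (max_value : Int), Dom_generate_invalid_part2 max_value → Spec_generate_invalid_part2 max_value (generate_invalid_part2 max_value)

-- ===== LEMMAS AND PROOFS =====

-- the set of numbers A's inner loop contributes for a given (base_len, k)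
def pvS (mv bl k : Int) : PySem.Set Int :=
  pvInnerA mv k PySem.Set.empty (PySem.List.pyRange ((10:Int) ^ (bl - 1).toNat) ((10:Int) ^ bl.toNat))

-- per-(n, base_len) step of A's middle loop, named for the proofs
def pvStepA (mv n : Int) (inv : PySem.Set Int) (bl : Int) : PySem.Set Int :=
  if PySem.Int.mod n bl ≠ 0 ∨ PySem.Int.floordiv n bl < 2 then inv
  else pvInnerA mv (PySem.Int.floordiv n bl) inv
    (PySem.List.pyRange ((10:Int) ^ (bl - 1).toNat) ((10:Int) ^ bl.toNat))

def pvRowA (mv : Int) (inv : PySem.Set Int) (n : Int) : PySem.Set Int :=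
  (PySem.List.pyRange 1 (PySem.Int.floordiv n 2 + 1)).foldl (pvStepA mv n) inv

def pvBodyA (mv : Int) : PySem.Set Int :=
  (PySem.List.pyRange 2 (PySem.Str.len (PySem.Int.toStr mv) + 1)).foldl (pvRowA mv) PySem.Set.empty

theorem mem_pvInnerA (mv k : Int) : ∀ (bs : List Int) (inv : PySem.Set Int) (x : Int),
    x ∈ pvInnerA mv k inv bs ↔ x ∈ inv ∨ x ∈ pvInnerA mv k PySem.Set.empty bs := by
  intro bs
  induction bs with
  | nil => intro inv x; simp [pvInnerA, PySem.Set.empty]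
  | cons b rest ih =>
      intro inv x
      simp only [pvInnerA]
      split_ifs with h
      · simp [PySem.Set.empty]
      · rw [ih, ih (PySem.Set.add PySem.Set.empty _)]
        simp only [PySem.Set.mem_add]
        simp [PySem.Set.empty]
        tauto

theorem nodup_pvInnerA (mv k : Int) : ∀ (bs : List Int) (inv : PySem.Set Int),
    inv.Nodup → (pvInnerA mv k inv bs).Nodup := by
  intro bs
  induction bs with
  | nil => intro inv h; exact h
  | cons b rest ih =>
      intro inv h
      simp only [pvInnerA]
      split_ifs with hb
      · exact h
      · exact ih _ (PySem.Set.nodup_add _ _ h)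

-- a set-valued loop whose step only ever ADDS elements: membership in the fold
theorem pv_foldl_mem (G : PySem.Set Int → Int → PySem.Set Int)
    (hG : ∀ inv n x, x ∈ G inv n ↔ x ∈ inv ∨ x ∈ G PySem.Set.empty n) :
    ∀ (l : List Int) (inv : PySem.Set Int) (x : Int),
      x ∈ l.foldl G inv ↔ x ∈ inv ∨ ∃ n ∈ l, x ∈ G PySem.Set.empty n := by
  intro l
  induction l with
  | nil => intro inv x; simp
  | cons n rest ih =>
      intro inv x
      rw [List.foldl_cons, ih, hG]
      constructor
      · rintro ((h | h) | ⟨m, hm, h⟩)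
        · exact Or.inl h
        · exact Or.inr ⟨n, List.mem_cons_self, h⟩
        · exact Or.inr ⟨m, List.mem_cons_of_mem _ hm, h⟩
      · rintro (h | ⟨m, hm, h⟩)
        · exact Or.inl (Or.inl h)
        · rcases List.mem_cons.mp hm with rfl | hm'
          · exact Or.inl (Or.inr h)
          · exact Or.inr ⟨m, hm', h⟩

theorem pv_foldl_nodup (G : PySem.Set Int → Int → PySem.Set Int)
    (hG : ∀ inv n, inv.Nodup → (G inv n).Nodup) :
    ∀ (l : List Int) (inv : PySem.Set Int), inv.Nodup → (l.foldl G inv).Nodup := by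
  intro l
  induction l with
  | nil => intro inv h; exact h
  | cons n rest ih => intro inv h; exact ih _ (hG _ _ h)

theorem pvStepA_mem (mv n : Int) : ∀ (inv : PySem.Set Int) (bl x : Int),
    x ∈ pvStepA mv n inv bl ↔ x ∈ inv ∨ x ∈ pvStepA mv n PySem.Set.empty bl := by
  intro inv bl x
  unfold pvStepA
  split_ifs with h
  · simp [PySem.Set.empty]
  · exact mem_pvInnerA mv _ _ inv x

theorem pvStepA_empty_mem (mv n bl x : Int) :
    x ∈ pvStepA mv n PySem.Set.empty bl ↔
      ¬(PySem.Int.mod n bl ≠ 0 ∨ PySem.Int.floordiv n bl < 2) ∧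
        x ∈ pvS mv bl (PySem.Int.floordiv n bl) := by
  unfold pvStepA pvS
  split_ifs with h
  · exact iff_of_false (by simp [PySem.Set.empty]) (fun hc => hc.1 h)
  · exact (and_iff_right h).symm

theorem pvRowA_mem (mv : Int) : ∀ (inv : PySem.Set Int) (n x : Int),
    x ∈ pvRowA mv inv n ↔ x ∈ inv ∨ x ∈ pvRowA mv PySem.Set.empty n := by
  intro inv n x
  unfold pvRowA
  rw [pv_foldl_mem (pvStepA mv n) (pvStepA_mem mv n),
      pv_foldl_mem (pvStepA mv n) (pvStepA_mem mv n)]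
  have hnil : x ∉ (PySem.Set.empty : PySem.Set Int) := by simp [PySem.Set.empty]
  tauto

theorem mem_pvBodyA (mv x : Int) :
    x ∈ pvBodyA mv ↔ ∃ n, (2 ≤ n ∧ n < PySem.Str.len (PySem.Int.toStr mv) + 1) ∧
      ∃ bl, (1 ≤ bl ∧ bl < PySem.Int.floordiv n 2 + 1) ∧
        ¬(PySem.Int.mod n bl ≠ 0 ∨ PySem.Int.floordiv n bl < 2) ∧
        x ∈ pvS mv bl (PySem.Int.floordiv n bl) := by
  unfold pvBodyA
  rw [pv_foldl_mem (pvRowA mv) (pvRowA_mem mv)]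
  simp only [PySem.Set.empty, List.not_mem_nil, false_or]
  constructor
  · rintro ⟨n, hn, hx⟩
    rw [pvRowA, pv_foldl_mem (pvStepA mv n) (pvStepA_mem mv n)] at hx
    simp only [PySem.Set.empty, List.not_mem_nil, false_or] at hx
    obtain ⟨bl, hbl, hx⟩ := hx
    exact ⟨n, PySem.List.mem_pyRange_one.mp hn, bl, PySem.List.mem_pyRange_one.mp hbl,
      (pvStepA_empty_mem mv n bl x).mp hx⟩
  · rintro ⟨n, hn, bl, hbl, hx⟩
    refine ⟨n, PySem.List.mem_pyRange_one.mpr hn, ?_⟩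
    rw [pvRowA, pv_foldl_mem (pvStepA mv n) (pvStepA_mem mv n)]
    simp only [PySem.Set.empty, List.not_mem_nil, false_or]
    exact ⟨bl, PySem.List.mem_pyRange_one.mpr hbl, (pvStepA_empty_mem mv n bl x).mpr hx⟩

theorem nodup_pvBodyA (mv : Int) : (pvBodyA mv).Nodup := by
  unfold pvBodyA
  refine pv_foldl_nodup _ ?_ _ _ (by simp [PySem.Set.empty])
  intro inv n h
  refine pv_foldl_nodup _ ?_ _ _ h
  intro inv' bl h'
  unfold pvStepA
  split_ifs with hc
  · exact h'
  · exact nodup_pvInnerA mv _ _ _ h'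

-- link: A's inner break-loop over pyRange collects exactly B's nums_for list
theorem mem_pvInnerA_iff_pvNumsGo (mv k : Int) : ∀ (n : Nat) (base stop x : Int),
    (stop - base).toNat = n →
    (x ∈ pvInnerA mv k PySem.Set.empty (PySem.List.pyRange base stop) ↔
      x ∈ pvNumsGo mv k base stop) := by
  intro n
  induction n with
  | zero =>
      intro base stop x hn
      have hbs : ¬ base < stop := by omega
      have hr : PySem.List.pyRange base stop = [] := by
        refine List.eq_nil_iff_forall_not_mem.mpr (fun y hy => ?_)
        have := PySem.List.mem_pyRange_one.mp hy
        omega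
      rw [hr]
      unfold pvNumsGo
      simp [pvInnerA, PySem.Set.empty, hbs]
  | succ m ih =>
      intro base stop x hn
      have hbs : base < stop := by omega
      rw [PySem.List.pyRange_one_cons hbs]
      unfold pvNumsGo
      simp only [hbs, dif_pos]
      simp only [pvInnerA]
      split_ifs with h
      · simp [PySem.Set.empty]
      · rw [mem_pvInnerA, ih (base+1) stop x (by omega)]
        simp [PySem.Set.empty]

theorem mem_pvS_iff_pvNumsFor (mv bl k x : Int) :
    x ∈ pvS mv bl k ↔ x ∈ pvNumsFor mv bl k := by
  unfold pvS pvNumsFor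
  exact mem_pvInnerA_iff_pvNumsGo mv k _ _ _ x rfl

-- membership in the k-fold of Set.update in pvCollect
theorem mem_foldl_update (f : Int → List Int) :
    ∀ (l : List Int) (init : PySem.Set Int) (x : Int),
      x ∈ l.foldl (fun s k => PySem.Set.update s (f k)) init ↔
        x ∈ init ∨ ∃ k ∈ l, x ∈ f k := by
  intro l
  induction l with
  | nil => intro init x; simp
  | cons n rest ih =>
      intro init x
      rw [List.foldl_cons, ih, PySem.Set.mem_update]
      constructor
      · rintro ((h | h) | ⟨m, hm, h⟩)
        · exact Or.inl h
        · exact Or.inr ⟨n, List.mem_cons_self, h⟩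
        · exact Or.inr ⟨m, List.mem_cons_of_mem _ hm, h⟩
      · rintro (h | ⟨m, hm, h⟩)
        · exact Or.inl (Or.inl h)
        · rcases List.mem_cons.mp hm with rfl | hm'
          · exact Or.inl (Or.inr h)
          · exact Or.inr ⟨m, hm', h⟩

theorem mem_pvCollect (mv L : Int) : ∀ (n : Nat) (bl x : Int), (L + 2 - 2 * bl).toNat = n →
    (x ∈ pvCollect mv L bl ↔
      ∃ p, (bl ≤ p ∧ ¬ L < 2 * p) ∧
        ∃ k, (2 ≤ k ∧ k < PySem.Int.floordiv L p + 1) ∧ x ∈ pvNumsFor mv p k) := by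
  intro n
  induction n using Nat.strong_induction_on with
  | _ n ih =>
      intro bl x hn
      rw [pvCollect.eq_def]
      split_ifs with h
      · simp only [PySem.Set.empty, List.not_mem_nil, false_iff]
        rintro ⟨p, ⟨hblp, hLp⟩, -⟩
        omega
      · rw [mem_foldl_update]
        have hrec := ih (L + 2 - 2 * (bl + 1)).toNat (by omega) (bl + 1) x rfl
        rw [hrec]
        constructor
        · rintro (⟨p, ⟨hp1, hp2⟩, k, hk, hx⟩ | ⟨k, hk, hx⟩)
          · exact ⟨p, ⟨by omega, hp2⟩, k, hk, hx⟩
          · exact ⟨bl, ⟨le_refl _, h⟩, k, PySem.List.mem_pyRange_one.mp hk, hx⟩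
        · rintro ⟨p, ⟨hp1, hp2⟩, k, hk, hx⟩
          by_cases hpb : p = bl
          · subst hpb
            exact Or.inr ⟨k, PySem.List.mem_pyRange_one.mpr hk, hx⟩
          · exact Or.inl ⟨p, ⟨by omega, hp2⟩, k, hk, hx⟩

theorem nodup_pvCollect (mv L : Int) : ∀ (n : Nat) (bl : Int), (L + 2 - 2 * bl).toNat = n →
    (pvCollect mv L bl).Nodup := by
  intro n
  induction n using Nat.strong_induction_on with
  | _ n ih =>
      intro bl hn
      rw [pvCollect.eq_def]
      split_ifs with h
      · simp [PySem.Set.empty]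
      · refine pv_foldl_nodup _ ?_ _ _ (ih (L + 2 - 2 * (bl + 1)).toNat (by omega) (bl + 1) rfl)
        intro s k hs
        exact PySem.Set.nodup_update _ _ hs

-- the arithmetic bijection (n, base_len) ↦ (base_len, n / base_len)
theorem pv_pairs (ml : Int) (P : Int → Int → Prop) :
    (∃ n, (2 ≤ n ∧ n < ml + 1) ∧ ∃ bl, (1 ≤ bl ∧ bl < PySem.Int.floordiv n 2 + 1) ∧
        ¬(PySem.Int.mod n bl ≠ 0 ∨ PySem.Int.floordiv n bl < 2) ∧ P bl (PySem.Int.floordiv n bl))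
    ↔ (∃ bl, (1 ≤ bl ∧ ¬ ml < 2 * bl) ∧
        ∃ k, (2 ≤ k ∧ k < PySem.Int.floordiv ml bl + 1) ∧ P bl k) := by
  constructor
  · rintro ⟨n, ⟨h2n, hnml⟩, bl, ⟨hbl1, _⟩, hcond, hP⟩
    push_neg at hcond
    obtain ⟨hmod, hk2⟩ := hcond
    have hbl0 : (0:Int) < bl := by omega
    have hdvd : bl ∣ n := (PySem.Int.mod_eq_zero_iff_dvd n bl).mp hmod
    have hfd : PySem.Int.floordiv n bl = n / bl := PySem.Int.floordiv_eq_ediv_of_pos hbl0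
    have hn : n / bl * bl = n := Int.ediv_mul_cancel hdvd
    have h2bl : 2 * bl ≤ n / bl * bl := by
      have : 2 ≤ n / bl := by rw [← hfd]; exact hk2
      nlinarith
    refine ⟨bl, ⟨hbl1, by omega⟩, n / bl, ⟨by rw [← hfd]; exact hk2, ?_⟩,
      by rw [hfd] at hP; exact hP⟩
    have : n / bl ≤ PySem.Int.floordiv ml bl := by
      rw [PySem.Int.le_floordiv_iff_mul_le hbl0]
      omega
    omega
  · rintro ⟨bl, ⟨hbl1, hblml⟩, k, ⟨hk2, hkml⟩, hP⟩
    have hbl0 : (0:Int) < bl := by omega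
    have hfd : PySem.Int.floordiv (bl * k) bl = k := by
      rw [PySem.Int.floordiv_eq_ediv_of_pos hbl0]
      exact Int.mul_ediv_cancel_left k (by omega)
    have hkbl : k * bl ≤ ml := by
      have : k ≤ PySem.Int.floordiv ml bl := by omega
      exact (PySem.Int.le_floordiv_iff_mul_le hbl0).mp this
    refine ⟨bl * k, ⟨by nlinarith, by nlinarith⟩, bl, ⟨hbl1, ?_⟩, ?_, by rw [hfd]; exact hP⟩
    · have : bl ≤ PySem.Int.floordiv (bl * k) 2 := by
        rw [PySem.Int.le_floordiv_iff_mul_le (by norm_num)]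
        nlinarith
      omega
    · rw [hfd]
      push_neg
      exact ⟨(PySem.Int.mod_eq_zero_iff_dvd _ _).mpr (dvd_mul_right bl k), hk2⟩

theorem pv_body_eq_mem (mv x : Int) :
    x ∈ pvBodyA mv ↔ x ∈ pvCollect mv (PySem.Str.len (PySem.Int.toStr mv)) 1 := by
  rw [mem_pvBodyA,
    pv_pairs (PySem.Str.len (PySem.Int.toStr mv)) (fun bl k => x ∈ pvS mv bl k),
    mem_pvCollect mv (PySem.Str.len (PySem.Int.toStr mv)) _ 1 x rfl]
  constructor
  · rintro ⟨bl, hbl, k, hk, hx⟩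
    exact ⟨bl, hbl, k, hk, (mem_pvS_iff_pvNumsFor mv bl k x).mp hx⟩
  · rintro ⟨bl, hbl, k, hk, hx⟩
    exact ⟨bl, hbl, k, hk, (mem_pvS_iff_pvNumsFor mv bl k x).mpr hx⟩

theorem pv_ports_eq (mv : Int) : generate_invalid_part2 mv = generate_invalid_part2_alt mv := by
  have hA : generate_invalid_part2 mv = PySem.List.sorted (pvBodyA mv) (fun x => x) false := by
    unfold generate_invalid_part2 pvBodyA pvRowA pvStepA
    rfl
  have hB : generate_invalid_part2_alt mv =
      PySem.List.sorted (pvCollect mv (PySem.Str.len (PySem.Int.toStr mv)) 1) (fun x => x) false := rfl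
  rw [hA, hB]
  exact (PySem.List.sorted_id_eq_sorted_id_iff_perm (pvBodyA mv) _).mpr
    ((List.perm_ext_iff_of_nodup (nodup_pvBodyA mv)
        (nodup_pvCollect mv (PySem.Str.len (PySem.Int.toStr mv)) _ 1 rfl)).mpr
      (fun a => pv_body_eq_mem mv a))

-- ===== VERDICT (by name: the statement is the Claim_ definition above) =====
theorem generate_invalid_part2_spec : Claim_equal_generate_invalid_part2 := by
  intro mv _
  exact pv_ports_eq mv
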